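-- pv_equiv track=rewrite | github.com/NobuyukiInoue/LeetCode | Problems/2100_2199/2148_Count_Elements_With_Strictly_Smaller_and_Greater_Elements/Project_Python3/Minimum_Cost_of_Buying_Candies_With_Discount.py | countElements_min_max
-- ===== SOURCE A (Python) =====
-- from typing import List, Dict, Tuple
--
-- def countElements_min_max(nums: List[int]) -> int:
--     # 67ms
--     v_min = min(nums)
--     v_max = max(nums)
--     res = 0
--     for _, num in enumerate(nums):
--         if num > v_min and num < v_max:
--             res += 1
--     return res
-- ===== SOURCE B (Python) =====
-- from typing import List, Dict, Tuple
--
-- def countElements_min_max(nums: List[int]) -> int: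
--     v_min = min(nums)
--     v_max = max(nums)
--     if v_min == v_max:
--         return 0
--     return len(nums) - nums.count(v_min) - nums.count(v_max)
-- ===== Notes on version B (the rewrite author's own statement) =====
-- stated objective: faster
-- what changed: Replaces the per-element two-sided comparison loop with a closed form: len(nums) - count(min) - count(max), guarded by the all-equal case.
import Mathlib
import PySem

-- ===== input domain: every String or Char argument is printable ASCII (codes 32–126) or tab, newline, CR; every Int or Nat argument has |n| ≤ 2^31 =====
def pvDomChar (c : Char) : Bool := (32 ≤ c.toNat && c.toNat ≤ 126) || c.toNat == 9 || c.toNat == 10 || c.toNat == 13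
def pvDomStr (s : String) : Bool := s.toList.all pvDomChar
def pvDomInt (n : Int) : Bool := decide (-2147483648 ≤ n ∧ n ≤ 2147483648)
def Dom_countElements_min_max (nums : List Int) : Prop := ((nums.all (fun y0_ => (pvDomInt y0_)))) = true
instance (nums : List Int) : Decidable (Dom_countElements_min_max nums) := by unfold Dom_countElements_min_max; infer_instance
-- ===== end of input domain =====

-- B replaces A's per-element two-sided comparison loop with the closed form
-- len(nums) - count(min) - count(max) (0 when all elements are equal); equivalence on nonempty lists.

-- ===== PORT A =====
def countElements_min_max (nums : List Int) : Int :=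
  match PySem.List.min? nums (fun x => x), PySem.List.max? nums (fun x => x) with
  | some vmin, some vmax =>
      nums.foldl (fun res num => if vmin < num ∧ num < vmax then res + 1 else res) 0
  | _, _ => 0   -- unreachable under Pre_ (Python min/max raise ValueError on [])

-- ===== PORT B =====
def countElements_min_max_alt (nums : List Int) : Int :=
  match PySem.List.min? nums (fun x => x) with
  | none => 0   -- unreachable under Pre_ (Python min raises ValueError on [])
  | some vmin =>
    match PySem.List.max? nums (fun x => x) with
    | none => 0
    | some vmax =>
      if vmin = vmax then 0
      else (nums.length : Int) - (PySem.List.count nums vmin : Int) - (PySem.List.count nums vmax : Int)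

-- ===== PRECONDITION & SPEC =====
-- Python's min()/max() raise ValueError on the empty list.
def Pre_countElements_min_max (nums : List Int) : Prop := nums ≠ []
instance (nums : List Int) : Decidable (Pre_countElements_min_max nums) := by unfold Pre_countElements_min_max; infer_instance
def pvWitness_countElements_min_max : List Int := [1, 2, 3]
def Spec_countElements_min_max (nums : List Int) (out : Int) : Prop := out = countElements_min_max_alt nums
instance (nums : List Int) (out : Int) : Decidable (Spec_countElements_min_max nums out) := by unfold Spec_countElements_min_max; infer_instance

-- ===== CLAIM (what is proved, stated in full; the proofs are below) =====
def Claim_equal_countElements_min_max : Prop := ∀ (nums : List Int), Dom_countElements_min_max nums → Pre_countElements_min_max nums → Spec_countElements_min_max nums (countElements_min_max nums)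

-- ===== LEMMAS AND PROOFS =====

-- A's loop is countP of the strict-between predicate.
theorem foldl_between_eq_countP (vmin vmax : Int) :
    ∀ (l : List Int) (acc : Int),
      l.foldl (fun res num => if vmin < num ∧ num < vmax then res + 1 else res) acc
        = acc + (l.countP (fun n => decide (vmin < n ∧ n < vmax)) : Int) := by
  intro l
  induction l with
  | nil => intro acc; simp
  | cons h t ih =>
      intro acc
      rw [List.foldl_cons, ih, List.countP_cons]
      by_cases hc : vmin < h ∧ h < vmax <;> simp [hc] <;> push_cast <;> ring

-- Each element of a bounded list is the min, the max, or strictly between.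
theorem countP_partition (vmin vmax : Int) :
    ∀ (l : List Int), (∀ x ∈ l, vmin ≤ x ∧ x ≤ vmax) → vmin < vmax →
      l.countP (fun n => decide (vmin < n ∧ n < vmax)) + l.count vmin + l.count vmax = l.length := by
  intro l
  induction l with
  | nil => simp
  | cons h t ih =>
      intro hb hlt
      have hh := hb h (List.mem_cons_self ..)
      have ht := ih (fun x hx => hb x (List.mem_cons_of_mem _ hx)) hlt
      obtain ⟨hl, hr⟩ := hh
      simp only [List.countP_cons, List.count_cons, List.length_cons, beq_iff_eq,
        decide_eq_true_eq]
      split_ifs <;> omega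

theorem countElements_min_max_spec : Claim_equal_countElements_min_max := by
  intro nums _ hpre
  unfold Spec_countElements_min_max countElements_min_max countElements_min_max_alt
  rcases hmin : PySem.List.min? nums (fun x => x) with _ | vmin
  · exact absurd ((PySem.List.min?_eq_none_iff _ _).mp hmin) hpre
  rcases hmax : PySem.List.max? nums (fun x => x) with _ | vmax
  · exact absurd ((PySem.List.max?_eq_none_iff _ _).mp hmax) hpre
  simp only
  have hlo : ∀ x ∈ nums, vmin ≤ x := PySem.List.min?_isMin hmin
  have hhi : ∀ x ∈ nums, x ≤ vmax := PySem.List.max?_isMax hmax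
  rw [foldl_between_eq_countP]
  by_cases heq : vmin = vmax
  · have : nums.countP (fun n => decide (vmin < n ∧ n < vmax)) = 0 := by
      apply List.countP_eq_zero.mpr
      intro x hx
      have := hlo x hx; have := hhi x hx
      simp only [decide_eq_true_eq]
      omega
    rw [this, if_pos heq]
    simp
  · obtain ⟨h, t, rfl⟩ := List.exists_cons_of_ne_nil hpre
    have hlt : vmin < vmax := by
      have h1 := hlo h (List.mem_cons_self ..)
      have h2 := hhi h (List.mem_cons_self ..)
      omega
    have hp := countP_partition vmin vmax (h :: t) (fun x hx => ⟨hlo x hx, hhi x hx⟩) hlt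
    simp only [if_neg heq, PySem.List.count_eq, zero_add]
    omega

-- ===== VERDICT (by name: the statement is the Claim_ definition above) =====
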